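-- pv_equiv track=rewrite | github.com/NitipoomKlaynium/NeetCode | test.py | waterContainer
-- ===== SOURCE A (Python) =====
-- def waterContainer(walls: list) -> list:
--     indices = list(range(0, len(walls)))
--
--     walls_order = sorted(indices, key=lambda x: walls[x], reverse=True)
--     waters = [-1] * (len(walls) - 1)
--     remaining = len(walls)
--
--     for i in range(1, len(walls_order)):
--         a = walls_order[i - 1]
--         b = walls_order[i]
--         start = min(a, b)
--         stop = max(a, b)
--         for j in range(start, stop):
--             if waters[j] == -1:
--                 waters[j] = walls[b]
--                 remaining -= 1
--
--     for i in range(len(waters)):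
--         if waters[i] == -1:
--             waters[i] = 0
--
--     return waters
-- ===== SOURCE B (Python) =====
-- def _runmax(xs):
--     # running maxima: out[j] = max(xs[:j+1])
--     out = []
--     m = 0
--     for j in range(len(xs)):
--         m = xs[j] if j == 0 else max(m, xs[j])
--         out.append(m)
--     return out
--
-- def waterContainer(walls: list) -> list:
--     # Water level at gap j is min(max(walls[:j+1]), max(walls[j+1:])).
--     # One running-max pass from each end instead of A's sort + interval painting.
--     pref = _runmax(walls[:-1])
--     suf = _runmax(walls[1:][::-1])[::-1]
--     return [min(a, b) for a, b in zip(pref, suf)]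
-- ===== Notes on version B (the rewrite author's own statement) =====
-- stated objective: alternative
-- what changed: Replaces A's sort of indices by height plus quadratic interval painting between consecutive sorted indices with two linear running-max passes computing each gap's level as min(prefix max, suffix max).
-- intended difference: On inputs with a gap whose walls on one side are all <= -1 with some wall equal to -1 while the other side has a wall >= -1 (so the true water level there is exactly -1), A returns 0 or a later lower paint value at that gap because -1 collides with its unfilled-cell sentinel, while B returns the true level min(left max, right max), which is the intended value. — e.g. on waterContainer([-1, -1]): A returns [0], B returns [-1]
import Mathlib
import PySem

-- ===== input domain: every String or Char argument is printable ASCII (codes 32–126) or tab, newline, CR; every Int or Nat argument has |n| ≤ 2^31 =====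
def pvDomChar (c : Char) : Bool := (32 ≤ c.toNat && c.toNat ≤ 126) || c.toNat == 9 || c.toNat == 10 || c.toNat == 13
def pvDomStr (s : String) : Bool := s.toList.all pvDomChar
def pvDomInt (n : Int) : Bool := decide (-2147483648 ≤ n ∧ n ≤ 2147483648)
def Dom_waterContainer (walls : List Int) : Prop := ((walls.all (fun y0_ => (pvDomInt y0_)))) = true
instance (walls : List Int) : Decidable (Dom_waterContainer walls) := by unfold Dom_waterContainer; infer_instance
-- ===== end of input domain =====

-- B replaces A's sort + descending interval painting by two running-max passes
-- (the level at gap j is min(prefix max, suffix max)); where at some gap every wall on one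
-- side is ≤ -1 with one equal to -1 and the other side has a wall ≥ -1 (so the true level
-- there is -1), A's -1 collides with its unfilled sentinel and A returns a different
-- value — stated as the intended difference D_.


-- ===== PORT A =====
-- literal port of A: sort the indices by wall height descending (stable), paint the gaps
-- between consecutive sorted indices with the later (lower) wall's height where still -1,
-- keep the unused 'remaining' counter in the fold state, then turn leftover -1 into 0.
-- All list indices are provably in range, so pyGetD/pySetD defaults are never reached.
def waterContainer (walls : List Int) : List Int :=
  let indices := PySem.List.pyRange 0 (walls.length : Int) 1
  let walls_order := PySem.List.sorted indices (fun x => PySem.List.pyGetD walls x 0) true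
  let st :=
    (PySem.List.pyRange 1 (walls_order.length : Int) 1).foldl
      (fun (st : List Int × Int) i =>
        let a := PySem.List.pyGetD walls_order (i - 1) 0
        let b := PySem.List.pyGetD walls_order i 0
        let start := min a b
        let stop := max a b
        (PySem.List.pyRange start stop 1).foldl
          (fun (st2 : List Int × Int) j =>
            if PySem.List.pyGetD st2.1 j 0 = -1 then
              (PySem.List.pySetD st2.1 j (PySem.List.pyGetD walls b 0), st2.2 - 1)
            else st2) st)
      (List.replicate (walls.length - 1) (-1 : Int), (walls.length : Int))
  (PySem.List.pyRange 0 (st.1.length : Int) 1).foldl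
    (fun ws i => if PySem.List.pyGetD ws i 0 = -1 then PySem.List.pySetD ws i 0 else ws) st.1

-- ===== PORT B =====
def runmaxB (xs : List Int) : List Int :=
  ((PySem.List.pyRange 0 (xs.length : Int) 1).foldl
    (fun (st : Int × List Int) j =>
      let m := if j = 0 then PySem.List.pyGetD xs j 0 else max st.1 (PySem.List.pyGetD xs j 0)
      (m, st.2 ++ [m])) ((0 : Int), ([] : List Int))).2

def waterContainer_alt (walls : List Int) : List Int :=
  let pref := runmaxB (PySem.List.slice walls none (some (-1)))
  let suf := (runmaxB (PySem.List.slice walls (some 1) none).reverse).reverse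
  (pref.zip suf).map (fun p => min p.1 p.2)

-- ===== PRECONDITION & SPEC =====
-- On inputs where -1 lies in the leading or trailing run of walls ≤ -1 and there is a
-- second -1 or a wall above -1 (exactly the inputs whose true water level at some gap is
-- -1), A returns 0 or a later, lower paint value at that gap because -1 collides with A's
-- unfilled-cell sentinel, while B returns the true level min(left max, right max), which
-- is the intended value.
def D_waterContainer (walls : List Int) : Prop :=
  (2 ≤ walls.count (-1) ∨ ∃ x ∈ walls, -1 < x) ∧
  ((-1 : Int) ∈ walls.takeWhile (· ≤ -1) ∨ (-1 : Int) ∈ walls.reverse.takeWhile (· ≤ -1))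
instance (walls : List Int) : Decidable (D_waterContainer walls) := by
  unfold D_waterContainer; infer_instance

def Spec_waterContainer (walls : List Int) (out : List Int) : Prop :=
  ¬ D_waterContainer walls → out = waterContainer_alt walls
instance (walls : List Int) (out : List Int) : Decidable (Spec_waterContainer walls out) := by
  unfold Spec_waterContainer; infer_instance

def pvDiffWitness_waterContainer : List Int := [-1, -1]
def pvDiffWitnessOut_waterContainer : (List Int) × (List Int) := ([0], [-1])

-- ===== CLAIM (what is proved, stated in full; the proofs are below) =====
def Claim_unchanged_waterContainer : Prop := ∀ (walls : List Int), Dom_waterContainer walls → Spec_waterContainer walls (waterContainer walls)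
def Claim_changed_waterContainer : Prop := Dom_waterContainer (pvDiffWitness_waterContainer) ∧ D_waterContainer (pvDiffWitness_waterContainer) ∧ waterContainer (pvDiffWitness_waterContainer) = pvDiffWitnessOut_waterContainer.1 ∧ waterContainer_alt (pvDiffWitness_waterContainer) = pvDiffWitnessOut_waterContainer.2 ∧ pvDiffWitnessOut_waterContainer.1 ≠ pvDiffWitnessOut_waterContainer.2
def Claim_exact_waterContainer : Prop := ∀ (walls : List Int), Dom_waterContainer walls → D_waterContainer walls → waterContainer walls ≠ waterContainer_alt walls

-- ===== LEMMAS AND PROOFS =====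
-- proof-side helpers: max of an Int list (0 on []) and the water level at gap j
def pvMx : List Int → Int
  | [] => 0
  | x :: t => t.foldl max x

def pvLevel (walls : List Int) (j : Nat) : Int :=
  min (pvMx (walls.take (j + 1))) (pvMx (walls.drop (j + 1)))

lemma pvMx_cons (x : Int) (t : List Int) : pvMx (x :: t) = t.foldl max x := rfl

lemma le_pvMx (l : List Int) (x : Int) (hx : x ∈ l) : x ≤ pvMx l := by
  cases l with
  | nil => cases hx
  | cons y t =>
    rw [pvMx_cons]
    rcases List.mem_cons.1 hx with h | h
    · subst h; exact (PySem.List.le_foldl_max t x).1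
    · exact (PySem.List.le_foldl_max t y).2 x h

lemma pvMx_le_of_forall (l : List Int) (v : Int) (hne : l ≠ []) (h : ∀ x ∈ l, x ≤ v) :
    pvMx l ≤ v := by
  cases l with
  | nil => exact absurd rfl hne
  | cons y t =>
    rw [pvMx_cons]
    induction t generalizing y with
    | nil => exact h y (by simp)
    | cons z t ih =>
      simp only [List.foldl_cons]
      exact ih (max y z) (by simp) (fun x hx => by
        rcases List.mem_cons.1 hx with rfl | hx
        · exact max_le (h y (by simp)) (h z (by simp))
        · exact h x (by simp [hx]))

lemma pvMx_eq_of (l : List Int) (v : Int) (hv : v ∈ l) (h : ∀ x ∈ l, x ≤ v) :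
    pvMx l = v :=
  le_antisymm (pvMx_le_of_forall l v (List.ne_nil_of_mem hv) h) (le_pvMx l v hv)

lemma pvMx_mem (l : List Int) (hne : l ≠ []) : pvMx l ∈ l := by
  cases l with
  | nil => exact absurd rfl hne
  | cons y t =>
    rw [pvMx_cons]
    induction t generalizing y with
    | nil => simp
    | cons z t ih =>
      simp only [List.foldl_cons]
      have h := ih (max y z) (by simp)
      rcases List.mem_cons.1 h with h' | h'
      · rw [h']
        rcases max_choice y z with hm | hm <;> simp [hm]
      · simp [List.mem_cons.2 (Or.inr h')]

lemma pvMx_eq_neg_one_iff (l : List Int) (hne : l ≠ []) :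
    pvMx l = -1 ↔ ((-1 : Int) ∈ l ∧ ∀ x ∈ l, x ≤ -1) := by
  constructor
  · intro h
    refine ⟨h ▸ pvMx_mem l hne, fun x hx => h ▸ le_pvMx l x hx⟩
  · rintro ⟨hm, hub⟩
    exact pvMx_eq_of l (-1) hm hub

def pvGapL (l : List Int) (j : Nat) : Prop :=
  ((-1 : Int) ∈ l.take (j + 1) ∧ ∀ x ∈ l.take (j + 1), x ≤ -1) ∧
    ∃ x ∈ l.drop (j + 1), (-1 : Int) ≤ x

def pvGapR (l : List Int) (j : Nat) : Prop :=
  ((-1 : Int) ∈ l.drop (j + 1) ∧ ∀ x ∈ l.drop (j + 1), x ≤ -1) ∧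
    ∃ x ∈ l.take (j + 1), (-1 : Int) ≤ x

def pvC (l : List Int) : Prop := 2 ≤ l.count (-1) ∨ ∃ x ∈ l, -1 < x

lemma levelNeg_iff (walls : List Int) :
    (∃ j < walls.length - 1, pvLevel walls j = -1)
      ↔ ∃ j < walls.length - 1, pvGapL walls j ∨ pvGapR walls j := by
  unfold pvGapL pvGapR
  constructor
  · rintro ⟨j, hj, hlev⟩
    refine ⟨j, hj, ?_⟩
    have hT : walls.take (j + 1) ≠ [] := by
      intro h
      have hlt : (walls.take (j + 1)).length = min (j + 1) walls.length := List.length_take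
      rw [h] at hlt
      simp at hlt
      omega
    have hD : walls.drop (j + 1) ≠ [] := by
      intro h
      have hld : (walls.drop (j + 1)).length = walls.length - (j + 1) := List.length_drop
      rw [h] at hld
      simp at hld
      omega
    rw [pvLevel] at hlev
    set A := pvMx (walls.take (j + 1)) with hA
    set B := pvMx (walls.drop (j + 1)) with hB
    rcases le_total A B with hab | hab
    · have hA1 : A = -1 := by omega
      have hB1 : (-1 : Int) ≤ B := by omega
      left
      exact ⟨(pvMx_eq_neg_one_iff _ hT).1 hA1, ⟨B, hB ▸ pvMx_mem _ hD, hB1⟩⟩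
    · have hB1 : B = -1 := by omega
      have hA1 : (-1 : Int) ≤ A := by omega
      right
      exact ⟨(pvMx_eq_neg_one_iff _ hD).1 hB1, ⟨A, hA ▸ pvMx_mem _ hT, hA1⟩⟩
  · rintro ⟨j, hj, h | h⟩
    · refine ⟨j, hj, ?_⟩
      obtain ⟨hL, x, hx, hx1⟩ := h
      have hT : walls.take (j + 1) ≠ [] := List.ne_nil_of_mem hL.1
      have hA : pvMx (walls.take (j + 1)) = -1 := (pvMx_eq_neg_one_iff _ hT).2 hL
      have hB : (-1 : Int) ≤ pvMx (walls.drop (j + 1)) := le_trans hx1 (le_pvMx _ x hx)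
      rw [pvLevel]; omega
    · refine ⟨j, hj, ?_⟩
      obtain ⟨hR, x, hx, hx1⟩ := h
      have hD : walls.drop (j + 1) ≠ [] := List.ne_nil_of_mem hR.1
      have hB : pvMx (walls.drop (j + 1)) = -1 := (pvMx_eq_neg_one_iff _ hD).2 hR
      have hA : (-1 : Int) ≤ pvMx (walls.take (j + 1)) := le_trans hx1 (le_pvMx _ x hx)
      rw [pvLevel]; omega

lemma first_split (x : Int) (l : List Int) (h : x ∈ l) :
    ∃ A B, l = A ++ x :: B ∧ x ∉ A := by
  induction l with
  | nil => cases h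
  | cons a t ih =>
    by_cases hax : a = x
    · exact ⟨[], t, by rw [hax]; rfl, by simp⟩
    · have hxt : x ∈ t := by
        rcases List.mem_cons.1 h with h' | h'
        · exact absurd h'.symm hax
        · exact h'
      obtain ⟨A, B, hAB, hxA⟩ := ih hxt
      exact ⟨a :: A, B, by rw [hAB]; rfl, by
        simp only [List.mem_cons, not_or]
        exact ⟨fun hh => hax hh.symm, hxA⟩⟩

lemma mem_tw (l : List Int) (k : Nat) (hm : (-1 : Int) ∈ l.take k)
    (hub : ∀ x ∈ l.take k, x ≤ -1) : (-1 : Int) ∈ l.takeWhile (· ≤ -1) := by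
  induction l generalizing k with
  | nil => simp at hm
  | cons a t ih =>
    cases k with
    | zero => simp at hm
    | succ k =>
      have ha : a ≤ -1 := hub a (by simp)
      rw [List.takeWhile_cons]
      simp only [ha, decide_true, if_true]
      rw [List.take_succ_cons] at hm hub
      rcases List.mem_cons.1 hm with h' | h'
      · exact List.mem_cons.2 (Or.inl h')
      · exact List.mem_cons.2 (Or.inr (ih k h' (fun x hx => hub x (by simp [hx]))))

lemma runL_of_gapL (l : List Int) (j : Nat) (h : pvGapL l j) :
    (-1 : Int) ∈ l.takeWhile (· ≤ -1) :=
  mem_tw l (j + 1) h.1.1 h.1.2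

lemma C_of_gapL (l : List Int) (j : Nat) (h : pvGapL l j) : pvC l := by
  obtain ⟨⟨hm, hub⟩, x, hx, hge⟩ := h
  rcases eq_or_lt_of_le hge with he | hlt
  · have h1 : 0 < (l.take (j + 1)).count (-1) := List.count_pos_iff.2 hm
    have h2 : 0 < (l.drop (j + 1)).count (-1) := List.count_pos_iff.2 (he ▸ hx)
    have hc : (l.take (j + 1) ++ l.drop (j + 1)).count (-1) = l.count (-1) := by
      rw [List.take_append_drop]
    rw [List.count_append] at hc
    exact Or.inl (by omega)
  · exact Or.inr ⟨x, List.mem_of_mem_drop hx, hlt⟩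

lemma gapL_of_run (l : List Int) (h1 : (-1 : Int) ∈ l.takeWhile (· ≤ -1)) (hC : pvC l) :
    ∃ j < l.length - 1, pvGapL l j := by
  obtain ⟨A, B, hAB, hnA⟩ := first_split _ _ h1
  obtain ⟨rest, hrest⟩ := List.takeWhile_prefix (l := l) (fun x => decide (x ≤ -1))
  have hw : ∀ x ∈ l.takeWhile (fun x => decide (x ≤ -1)), x ≤ -1 := by
    intro x hx
    have hp := List.mem_takeWhile_imp (p := fun x => decide (x ≤ -1)) hx
    simpa using hp
  have hl : l = (A ++ [-1]) ++ (B ++ rest) := by rw [← hrest, hAB]; simp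
  have hlen : (A ++ [(-1 : Int)]).length = A.length + 1 := by simp
  have htake : l.take (A.length + 1) = A ++ [-1] := by rw [hl]; exact List.take_left' hlen
  have hdrop : l.drop (A.length + 1) = B ++ rest := by rw [hl]; exact List.drop_left' hlen
  have hubA : ∀ x ∈ A ++ [(-1 : Int)], x ≤ -1 := by
    intro x hx
    rcases List.mem_append.1 hx with h | h
    · exact hw x (by rw [hAB]; exact List.mem_append_left _ h)
    · simp at h; omega
  have hT : ∃ x ∈ B ++ rest, (-1 : Int) ≤ x := by
    rcases hC with hcnt | ⟨x, hx, hlt⟩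
    · have hc : ((A ++ [(-1 : Int)]) ++ (B ++ rest)).count (-1) = l.count (-1) := by
        rw [← hl]
      rw [List.count_append, List.count_append, List.count_eq_zero.2 hnA] at hc
      simp at hc
      refine ⟨-1, List.count_pos_iff.1 ?_, le_rfl⟩
      rw [List.count_append]
      omega
    · have hxT : x ∈ B ++ rest := by
        rw [hl] at hx
        rcases List.mem_append.1 hx with h | h
        · exact absurd (hubA x h) (by omega)
        · exact h
      exact ⟨x, hxT, by omega⟩
  obtain ⟨x, hxT, hxge⟩ := hT
  have hTpos : 0 < (B ++ rest).length := List.length_pos_of_mem hxT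
  have hlength : l.length = A.length + 1 + (B ++ rest).length := by
    rw [hl]
    simp only [List.length_append, List.length_cons, List.length_nil]
  exact ⟨A.length, by omega,
    ⟨by rw [htake]; simp, by rw [htake]; exact hubA⟩,
    ⟨x, by rw [hdrop]; exact hxT, hxge⟩⟩

lemma gapRL (l : List Int) (j : Nat) (hj : j < l.length - 1) :
    pvGapR l j ↔ pvGapL l.reverse (l.length - 2 - j) := by
  have h1 : l.length - 2 - j + 1 = l.length - (j + 1) := by omega
  unfold pvGapR pvGapL
  rw [h1, List.take_reverse, List.drop_reverse]
  have h2 : l.length - (l.length - (j + 1)) = j + 1 := by omega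
  rw [h2]
  simp only [List.mem_reverse]

lemma C_rev (l : List Int) : pvC l.reverse ↔ pvC l := by
  unfold pvC
  simp [List.count_reverse]

lemma pvGap_iff_D (walls : List Int) :
    (∃ j < walls.length - 1, pvGapL walls j ∨ pvGapR walls j) ↔ D_waterContainer walls := by
  unfold D_waterContainer
  constructor
  · rintro ⟨j, hj, h | h⟩
    · exact ⟨C_of_gapL walls j h, Or.inl (runL_of_gapL walls j h)⟩
    · have hL := (gapRL walls j hj).1 h
      exact ⟨(C_rev walls).1 (C_of_gapL walls.reverse _ hL),
        Or.inr (runL_of_gapL walls.reverse _ hL)⟩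
  · rintro ⟨hC, hrun | hrun⟩
    · obtain ⟨j, hj, hg⟩ := gapL_of_run walls hrun hC
      exact ⟨j, hj, Or.inl hg⟩
    · obtain ⟨j', hj', hg⟩ := gapL_of_run walls.reverse hrun ((C_rev walls).2 hC)
      rw [List.length_reverse] at hj'
      refine ⟨walls.length - 2 - j', by omega, Or.inr ?_⟩
      rw [gapRL walls _ (by omega : walls.length - 2 - j' < walls.length - 1)]
      have he : walls.length - 2 - (walls.length - 2 - j') = j' := by omega
      rw [he]
      exact hg

lemma pvMx_append_singleton (l : List Int) (x : Int) :
    pvMx (l ++ [x]) = if l = [] then x else max (pvMx l) x := by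
  cases l with
  | nil => simp [pvMx]
  | cons y t => simp [pvMx_cons, List.foldl_append]

lemma pvMx_reverse (l : List Int) : pvMx l.reverse = pvMx l := by
  cases l with
  | nil => rfl
  | cons y t =>
    apply le_antisymm
    · exact pvMx_le_of_forall _ _ (by simp) (fun x hx =>
        le_pvMx _ x (List.mem_reverse.1 hx))
    · exact pvMx_le_of_forall _ _ (by simp) (fun x hx =>
        le_pvMx _ x (List.mem_reverse.2 hx))

lemma runmax_aux (xs : List Int) : ∀ k : Nat, k ≤ xs.length →
    (PySem.List.pyRange 0 (k : Int) 1).foldl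
      (fun (st : Int × List Int) j =>
        let m := if j = 0 then PySem.List.pyGetD xs j 0 else max st.1 (PySem.List.pyGetD xs j 0)
        (m, st.2 ++ [m])) ((0 : Int), ([] : List Int))
    = ((if k = 0 then 0 else pvMx (xs.take k)),
       (List.range k).map (fun j => pvMx (xs.take (j + 1)))) := by
  intro k
  induction k with
  | zero => intro _; simp [PySem.List.pyRange_one_eq_nil]
  | succ k ih =>
    intro hk
    have hk' : k < xs.length := hk
    have hsplit : PySem.List.pyRange 0 ((k + 1 : Nat) : Int) 1
        = PySem.List.pyRange 0 (k : Int) 1 ++ [(k : Int)] := by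
      push_cast
      exact PySem.List.pyRange_one_succ_right (by exact_mod_cast Nat.zero_le k)
    rw [hsplit, List.foldl_append, ih (le_of_lt hk')]
    have hget : PySem.List.pyGetD xs (k : Int) 0 = xs[k] := by
      rw [PySem.List.pyGetD_natCast]
      exact List.getD_eq_getElem _ _ hk'
    have htake : xs.take (k + 1) = xs.take k ++ [xs[k]] := by
      rw [List.take_add_one]
      simp [List.getElem?_eq_getElem hk']
    simp only [List.foldl_cons, List.foldl_nil, hget]
    by_cases h0 : k = 0
    · subst h0
      simp [htake, pvMx, List.range_succ]
    · have hne : xs.take k ≠ [] := by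
        have hlen : (xs.take k).length = k := by rw [List.length_take]; omega
        intro h; rw [h] at hlen; exact h0 hlen.symm
      have : ((k : Int) = 0) = False := by simp; omega
      simp only [this, if_false, if_neg h0, List.range_succ, List.map_append, List.map_cons,
        List.map_nil]
      rw [htake, pvMx_append_singleton, if_neg hne]
      simp

lemma runmaxB_eq (xs : List Int) :
    runmaxB xs = (List.range xs.length).map (fun j => pvMx (xs.take (j + 1))) := by
  rw [runmaxB, runmax_aux xs xs.length le_rfl]

lemma alt_eq (walls : List Int) :
    waterContainer_alt walls
      = (List.range (walls.length - 1)).map (fun j => pvLevel walls j) := by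
  unfold waterContainer_alt
  dsimp only
  rw [PySem.List.slice_to_neg_one, PySem.List.slice_from_one, runmaxB_eq, runmaxB_eq]
  have hldl : walls.dropLast.length = walls.length - 1 := by simp
  have hlt : walls.tail.reverse.length = walls.length - 1 := by simp
  rw [hldl, hlt]
  have hpref : (List.range (walls.length - 1)).map
      (fun j => pvMx (walls.dropLast.take (j + 1)))
      = (List.range (walls.length - 1)).map (fun j => pvMx (walls.take (j + 1))) := by
    apply List.map_congr_left
    intro j hj
    rw [List.mem_range] at hj
    rw [List.dropLast_eq_take, List.take_take]
    congr 2
    omega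
  have hsuf : ((List.range (walls.length - 1)).map
      (fun i => pvMx (walls.tail.reverse.take (i + 1)))).reverse
      = (List.range (walls.length - 1)).map (fun j => pvMx (walls.drop (j + 1))) := by
    apply List.ext_getElem
    · simp
    · intro j h1 h2
      simp only [List.length_reverse, List.length_map, List.length_range] at h1 h2
      rw [List.getElem_reverse]
      simp only [List.length_map, List.length_range]
      rw [List.getElem_map, List.getElem_range]
      have he : walls.length - 1 - 1 - j + 1 = walls.length - 1 - j := by omega
      rw [he, List.take_reverse, pvMx_reverse]
      have he2 : walls.tail.length - (walls.length - 1 - j) = j := by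
        rw [List.length_tail]; omega
      rw [he2]
      rw [← List.drop_one, List.drop_drop, List.getElem_map, List.getElem_range,
        Nat.add_comm 1 j]
  rw [hpref, hsuf, List.zip_map', List.map_map]
  rfl

def pvPaint (w : List Int) (v s t : Int) : List Int :=
  (PySem.List.pyRange s t 1).foldl
    (fun w j => if PySem.List.pyGetD w j 0 = -1 then PySem.List.pySetD w j v else w) w

def pvChain (walls : List Int) (a : Int) (R : List Int) (w : List Int) : List Int :=
  match R with
  | [] => w
  | b :: r => pvChain walls b r (pvPaint w (PySem.List.pyGetD walls b 0) (min a b) (max a b))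

def pvCrossed (V : List Int) (j : Nat) : Prop :=
  (∃ x ∈ V, x ≤ (j : Int)) ∧ (∃ x ∈ V, (j : Int) < x)

lemma paintFold_length (v : Int) (rng : List Int) : ∀ w : List Int,
    (rng.foldl (fun w j => if PySem.List.pyGetD w j 0 = -1 then PySem.List.pySetD w j v else w) w).length
      = w.length := by
  induction rng with
  | nil => intro w; rfl
  | cons j rng ih =>
    intro w
    simp only [List.foldl_cons]
    rw [ih]
    split_ifs with h
    · exact PySem.List.length_pySetD _ _ _
    · rfl

lemma pvPaint_length (w : List Int) (v s t : Int) : (pvPaint w v s t).length = w.length :=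
  paintFold_length v _ w

lemma pvChain_length (walls : List Int) (R : List Int) :
    ∀ (a : Int) (w : List Int), (pvChain walls a R w).length = w.length := by
  induction R with
  | nil => intro a w; rfl
  | cons b r ih =>
    intro a w
    rw [pvChain, ih, pvPaint_length]

lemma pvPaint_getD_aux : ∀ (fuel : Nat) (s t : Int), (t - s).toNat ≤ fuel → 0 ≤ s →
    ∀ (w : List Int) (v : Int), t ≤ (w.length : Int) → ∀ j : Nat,
    (pvPaint w v s t).getD j 0
      = if s ≤ (j : Int) ∧ (j : Int) < t ∧ w.getD j 0 = -1 then v else w.getD j 0 := by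
  intro fuel
  induction fuel with
  | zero =>
    intro s t hf hs w v ht j
    rw [pvPaint, PySem.List.pyRange_one_eq_nil (by omega), List.foldl_nil]
    split_ifs with h
    · omega
    · rfl
  | succ fuel ih =>
    intro s t hf hs w v ht j
    by_cases hts : t ≤ s
    · rw [pvPaint, PySem.List.pyRange_one_eq_nil hts, List.foldl_nil]
      split_ifs with h
      · omega
      · rfl
    · push Not at hts
      have hstep : pvPaint w v s t
          = pvPaint (if PySem.List.pyGetD w s 0 = -1 then PySem.List.pySetD w s v else w) v (s + 1) t := by
        rw [pvPaint, PySem.List.pyRange_one_cons hts, List.foldl_cons]; rfl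
      set w' := if PySem.List.pyGetD w s 0 = -1 then PySem.List.pySetD w s v else w with hw'
      have hlen' : w'.length = w.length := by
        rw [hw']; split_ifs <;> simp [PySem.List.length_pySetD]
      rw [hstep, ih (s + 1) t (by omega) (by omega) w' v (by omega ) j]
      have hslen : s.toNat < w.length := by omega
      have hgs : PySem.List.pyGetD w s 0 = w.getD s.toNat 0 := by
        rw [PySem.List.pyGetD_of_nonneg w 0 hs]
      have hset : ∀ u : Int, PySem.List.pySetD w s u = w.set s.toNat u := fun u =>
        PySem.List.pySetD_of_nonneg w u hs
      by_cases hjs : (j : Int) = s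
      · have hj : j = s.toNat := by omega
        have hwj : w'.getD j 0 = if w.getD j 0 = -1 then v else w.getD j 0 := by
          rw [hw', hgs, ← hj]
          split_ifs with h
          · rw [hset, List.getD_eq_getElem _ _ (by rw [List.length_set]; omega)]
            rw [List.getElem_set]
            simp [hj]
          · rfl
        by_cases hm : w.getD j 0 = -1
        · rw [hwj, if_pos hm]
          rw [if_neg (by omega), if_pos ⟨by omega, by omega, hm⟩]
        · rw [hwj, if_neg hm, if_neg (by intro hh; exact hm hh.2.2), if_neg (by omega)]
      · have hwj : w'.getD j 0 = w.getD j 0 := by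
          rw [hw']
          split_ifs with h
          · rw [hset]
            by_cases hjl : j < w.length
            · rw [List.getD_eq_getElem _ _ (by rw [List.length_set]; omega),
                List.getElem_set, List.getD_eq_getElem _ _ hjl]
              simp only [if_neg (by omega : ¬ s.toNat = j)]
            · rw [List.getD_eq_default _ _ (by rw [List.length_set]; omega),
                List.getD_eq_default _ _ (by omega)]
          · rfl
        rw [hwj]
        split_ifs with h1 h2 h2
        · rfl
        · omega
        · omega
        · rfl

lemma pvPaint_getD (w : List Int) (v s t : Int) (hs : 0 ≤ s) (ht : t ≤ (w.length : Int)) (j : Nat) :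
    (pvPaint w v s t).getD j 0
      = if s ≤ (j : Int) ∧ (j : Int) < t ∧ w.getD j 0 = -1 then v else w.getD j 0 :=
  pvPaint_getD_aux (t - s).toNat s t le_rfl hs w v ht j

def pvOrder (walls : List Int) : List Int :=
  PySem.List.sorted (PySem.List.pyRange 0 (walls.length : Int) 1)
    (fun x => PySem.List.pyGetD walls x 0) true

def pvW (walls : List Int) : List Int :=
  match pvOrder walls with
  | [] => List.replicate (walls.length - 1) (-1 : Int)
  | o0 :: r => pvChain walls o0 r (List.replicate (walls.length - 1) (-1 : Int))

lemma inner_fst (v : Int) (rng : List Int) : ∀ st : List Int × Int,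
    (rng.foldl (fun (st2 : List Int × Int) j =>
        if PySem.List.pyGetD st2.1 j 0 = -1 then (PySem.List.pySetD st2.1 j v, st2.2 - 1)
        else st2) st).1
    = rng.foldl (fun w j => if PySem.List.pyGetD w j 0 = -1 then PySem.List.pySetD w j v else w) st.1 := by
  induction rng with
  | nil => intro st; rfl
  | cons j rng ih =>
    intro st
    simp only [List.foldl_cons]
    rw [ih]
    split_ifs with h <;> rfl

lemma outer_fst (walls order : List Int) (ilist : List Int) : ∀ st : List Int × Int,
    ((ilist.foldl (fun (st : List Int × Int) i =>
        let a := PySem.List.pyGetD order (i - 1) 0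
        let b := PySem.List.pyGetD order i 0
        let start := min a b
        let stop := max a b
        (PySem.List.pyRange start stop 1).foldl
          (fun (st2 : List Int × Int) j =>
            if PySem.List.pyGetD st2.1 j 0 = -1 then
              (PySem.List.pySetD st2.1 j (PySem.List.pyGetD walls b 0), st2.2 - 1)
            else st2) st) st).1)
    = ilist.foldl (fun w i =>
        pvPaint w (PySem.List.pyGetD walls (PySem.List.pyGetD order i 0) 0)
          (min (PySem.List.pyGetD order (i - 1) 0) (PySem.List.pyGetD order i 0))
          (max (PySem.List.pyGetD order (i - 1) 0) (PySem.List.pyGetD order i 0))) st.1 := by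
  induction ilist with
  | nil => intro st; rfl
  | cons i ilist ih =>
    intro st
    simp only [List.foldl_cons]
    rw [ih, inner_fst]
    rfl

lemma fold_chain (walls : List Int) : ∀ (r : List Int) (x : Int) (w : List Int),
    (List.range r.length).foldl (fun w k =>
        pvPaint w (PySem.List.pyGetD walls ((x :: r).getD (k + 1) 0) 0)
          (min ((x :: r).getD k 0) ((x :: r).getD (k + 1) 0))
          (max ((x :: r).getD k 0) ((x :: r).getD (k + 1) 0))) w
    = pvChain walls x r w := by
  intro r
  induction r with
  | nil => intro x w; rfl
  | cons b r ih =>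
    intro x w
    rw [List.length_cons, List.range_succ_eq_map, List.foldl_cons, List.foldl_map]
    simp only [List.getD_cons_succ, List.getD_cons_zero]
    rw [pvChain]
    exact ih b _

lemma pvPaint_zero_map (w : List Int) :
    pvPaint w 0 0 (w.length : Int) = w.map (fun x => if x = -1 then 0 else x) := by
  apply List.ext_getElem
  · rw [pvPaint_length, List.length_map]
  · intro j h1 h2
    have h1' : j < w.length := by rw [pvPaint_length] at h1; exact h1
    have hh := pvPaint_getD w 0 0 (w.length : Int) le_rfl le_rfl j
    rw [List.getD_eq_getElem _ _ h1, List.getD_eq_getElem _ _ h1'] at hh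
    rw [hh, List.getElem_map]
    split_ifs with hA hB hB
    · rfl
    · exact absurd hA.2.2 hB
    · exact absurd ⟨by omega, by exact_mod_cast h1', hB⟩ hA
    · rfl

lemma A_eq_map (walls : List Int) :
    waterContainer walls = (pvW walls).map (fun x => if x = -1 then 0 else x) := by
  unfold waterContainer
  dsimp only
  rw [outer_fst walls]
  have hOrd : PySem.List.sorted (PySem.List.pyRange 0 (walls.length : Int) 1)
      (fun x => PySem.List.pyGetD walls x 0) true = pvOrder walls := rfl
  rw [hOrd]
  have hst : (PySem.List.pyRange 1 (((pvOrder walls).length : Int)) 1).foldl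
      (fun w i =>
        pvPaint w (PySem.List.pyGetD walls (PySem.List.pyGetD (pvOrder walls) i 0) 0)
          (min (PySem.List.pyGetD (pvOrder walls) (i - 1) 0) (PySem.List.pyGetD (pvOrder walls) i 0))
          (max (PySem.List.pyGetD (pvOrder walls) (i - 1) 0) (PySem.List.pyGetD (pvOrder walls) i 0)))
      (List.replicate (walls.length - 1) (-1 : Int))
      = pvW walls := by
    cases ho : pvOrder walls with
    | nil =>
      rw [pvW, ho]
      norm_num [PySem.List.pyRange_one_eq_nil]
    | cons x r =>
      rw [List.length_cons, PySem.List.pyRange_one, List.foldl_map]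
      have htn : (((r.length + 1 : Nat) : Int) - 1).toNat = r.length := by omega
      rw [htn]
      have hbody : (fun (w : List Int) (k : Nat) =>
          pvPaint w (PySem.List.pyGetD walls (PySem.List.pyGetD (x :: r) (1 + (k : Int)) 0) 0)
            (min (PySem.List.pyGetD (x :: r) (1 + (k : Int) - 1) 0)
              (PySem.List.pyGetD (x :: r) (1 + (k : Int)) 0))
            (max (PySem.List.pyGetD (x :: r) (1 + (k : Int) - 1) 0)
              (PySem.List.pyGetD (x :: r) (1 + (k : Int)) 0)))
          = (fun (w : List Int) (k : Nat) =>
          pvPaint w (PySem.List.pyGetD walls ((x :: r).getD (k + 1) 0) 0)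
            (min ((x :: r).getD k 0) ((x :: r).getD (k + 1) 0))
            (max ((x :: r).getD k 0) ((x :: r).getD (k + 1) 0))) := by
        funext w k
        have e1 : (1 : Int) + (k : Int) - 1 = ((k : Nat) : Int) := by omega
        have e2 : (1 : Int) + (k : Int) = (((k + 1 : Nat)) : Int) := by omega
        rw [e1, e2, PySem.List.pyGetD_natCast, PySem.List.pyGetD_natCast]
      rw [hbody, fold_chain, pvW, ho]
  rw [hst]
  exact pvPaint_zero_map (pvW walls)

lemma mem_take_iff (walls : List Int) (m : Nat) (x : Int) :
    x ∈ walls.take m ↔ ∃ i : Nat, i < m ∧ ∃ h : i < walls.length, walls[i] = x := by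
  rw [List.mem_iff_getElem]
  constructor
  · rintro ⟨i, hi, hx⟩
    have hi' : i < m ∧ i < walls.length := by
      have := hi; rw [List.length_take] at this; omega
    exact ⟨i, hi'.1, hi'.2, by rw [← List.getElem_take]; exact hx⟩
  · rintro ⟨i, him, hlen, hx⟩
    exact ⟨i, by rw [List.length_take]; omega, by rw [List.getElem_take]; exact hx⟩

lemma mem_drop_iff (walls : List Int) (m : Nat) (x : Int) :
    x ∈ walls.drop m ↔ ∃ i : Nat, m ≤ i ∧ ∃ h : i < walls.length, walls[i] = x := by
  rw [List.mem_iff_getElem]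
  constructor
  · rintro ⟨i, hi, hx⟩
    have hi' : m + i < walls.length := by
      have := hi; rw [List.length_drop] at this; omega
    exact ⟨m + i, by omega, hi', by rw [← List.getElem_drop]; exact hx⟩
  · rintro ⟨i, him, hlen, hx⟩
    refine ⟨i - m, by rw [List.length_drop]; omega, ?_⟩
    rw [List.getElem_drop]
    have : m + (i - m) = i := by omega
    simp_rw [this]
    exact hx

lemma pvChain_inv (walls : List Int)
    (H : ∀ j : Nat, j < walls.length - 1 → pvLevel walls j ≠ -1)
    (order : List Int)
    (hmem : ∀ y : Int, y ∈ order ↔ (0 ≤ y ∧ y < (walls.length : Int)))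
    (hpw : order.Pairwise (fun p q => PySem.List.pyGetD walls q 0 ≤ PySem.List.pyGetD walls p 0)) :
    ∀ (R V : List Int) (a : Int) (w : List Int),
      order = V ++ R → a ∈ V →
      w.length = walls.length - 1 →
      (∀ j : Nat, j < walls.length - 1 →
        (pvCrossed V j → w.getD j 0 = pvLevel walls j) ∧
        (¬ pvCrossed V j → w.getD j 0 = -1)) →
      (∀ j : Nat, j < walls.length - 1 →
        (pvCrossed (V ++ R) j → (pvChain walls a R w).getD j 0 = pvLevel walls j) ∧
        (¬ pvCrossed (V ++ R) j → (pvChain walls a R w).getD j 0 = -1)) := by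
  intro R
  induction R with
  | nil =>
    intro V a w hsplit ha hlen hinv j hj
    simpa using hinv j hj
  | cons b r IH =>
    intro V a w hsplit ha hlen hinv j hj
    -- basic facts
    have hb_mem : b ∈ order := by rw [hsplit]; simp
    have hbb := (hmem b).1 hb_mem
    have ha_mem : a ∈ order := by rw [hsplit]; exact List.mem_append_left _ ha
    have haa := (hmem a).1 ha_mem
    have hn1 : (1 : Int) ≤ (walls.length : Int) := by omega
    have hpw' := hpw
    rw [hsplit, List.pairwise_append] at hpw'
    obtain ⟨hpwV, hpwbr, hVbr⟩ := hpw'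
    have hrb : ∀ y ∈ r, PySem.List.pyGetD walls y 0 ≤ PySem.List.pyGetD walls b 0 :=
      (List.pairwise_cons.1 hpwbr).1
    have hkab : PySem.List.pyGetD walls b 0 ≤ PySem.List.pyGetD walls a 0 :=
      hVbr a ha b (List.mem_cons_self)
    -- key as a getElem
    have keyval : ∀ x : Int, 0 ≤ x → x < (walls.length : Int) →
        ∀ h : x.toNat < walls.length, PySem.List.pyGetD walls x 0 = walls[x.toNat] := by
      intro x hx0 hxn h
      rw [PySem.List.pyGetD_of_nonneg walls 0 hx0, List.getD_eq_getElem _ _ h]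
    have keyvalN : ∀ i : Nat, ∀ h : i < walls.length,
        PySem.List.pyGetD walls (i : Int) 0 = walls[i] := by
      intro i h
      rw [PySem.List.pyGetD_natCast, List.getD_eq_getElem _ _ h]
    have hbNat : b.toNat < walls.length := by omega
    have haNat : a.toNat < walls.length := by omega
    have hkb := keyval b hbb.1 hbb.2 hbNat
    have hka := keyval a haa.1 haa.2 haNat
    -- the painted list
    set s := min a b with hs
    set t := max a b with ht
    set vB := PySem.List.pyGetD walls b 0 with hvB
    set w' := pvPaint w vB s t with hw'
    have hlen' : w'.length = w.length := pvPaint_length _ _ _ _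
    have hgd : ∀ j' : Nat, w'.getD j' 0
        = if s ≤ (j' : Int) ∧ (j' : Int) < t ∧ w.getD j' 0 = -1 then vB else w.getD j' 0 := by
      intro j'
      exact pvPaint_getD w vB s t (by omega) (by rw [hlen]; omega) j'
    -- the new invariant for V ++ [b]
    have hinv' : ∀ j : Nat, j < walls.length - 1 →
        (pvCrossed (V ++ [b]) j → w'.getD j 0 = pvLevel walls j) ∧
        (¬ pvCrossed (V ++ [b]) j → w'.getD j 0 = -1) := by
      intro j hj
      by_cases hc : pvCrossed V j
      · have hlev := (hinv j hj).1 hc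
        have hne := H j hj
        have hval : w'.getD j 0 = pvLevel walls j := by
          rw [hgd j]
          rw [if_neg (by rw [hlev]; tauto)]
          exact hlev
        refine ⟨fun _ => hval, fun hnc' => ?_⟩
        exfalso
        obtain ⟨⟨x1, hx1, hx1'⟩, ⟨x2, hx2, hx2'⟩⟩ := hc
        exact hnc' ⟨⟨x1, List.mem_append_left _ hx1, hx1'⟩, ⟨x2, List.mem_append_left _ hx2, hx2'⟩⟩
      · have hm1 := (hinv j hj).2 hc
        have hall : (∀ x ∈ V, (j : Int) < x) ∨ (∀ x ∈ V, x ≤ (j : Int)) := by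
          unfold pvCrossed at hc
          by_cases h1 : ∃ x ∈ V, x ≤ (j : Int)
          · right
            intro x hx
            by_contra hgt
            exact hc ⟨h1, ⟨x, hx, by omega⟩⟩
          · left
            intro x hx
            by_contra hle
            exact h1 ⟨x, hx, by omega⟩
        by_cases hin : s ≤ (j : Int) ∧ (j : Int) < t
        · have hvj : w'.getD j 0 = vB := by rw [hgd j, if_pos ⟨hin.1, hin.2, hm1⟩]
          have hcross' : pvCrossed (V ++ [b]) j := by
            rcases le_total a b with hab | hab
            · exact ⟨⟨a, List.mem_append_left _ ha, by simp [hs] at hin; omega⟩,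
                ⟨b, List.mem_append_right _ (by simp), by simp [ht] at hin; omega⟩⟩
            · exact ⟨⟨b, List.mem_append_right _ (by simp), by simp [hs] at hin; omega⟩,
                ⟨a, List.mem_append_left _ ha, by simp [ht] at hin; omega⟩⟩
          have hlevel : pvLevel walls j = vB := by
            rcases hall with hgt | hle
            · -- all of V lies right of gap j; b ≤ j < a
              have haj : (j : Int) < a := hgt a ha
              have hbj : b ≤ (j : Int) := by
                rcases le_total a b with h' | h'
                · simp [hs] at hin; omega
                · simp [hs] at hin; omega
              -- max of left part is key b
              have hleft : pvMx (walls.take (j + 1)) = vB := by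
                have hkb' := keyval b hbb.1 hbb.2 hbNat
                apply pvMx_eq_of
                · rw [hvB, hkb', mem_take_iff]
                  exact ⟨b.toNat, by omega, hbNat, rfl⟩
                · intro x hx
                  rw [mem_take_iff] at hx
                  obtain ⟨i, him, hilen, hix⟩ := hx
                  have hio : (i : Int) ∈ order := (hmem _).2 ⟨by omega, by omega⟩
                  rw [hsplit, List.mem_append] at hio
                  rw [← hix, ← keyvalN i hilen]
                  rcases hio with hiV | hibr
                  · exact absurd (hgt _ hiV) (by omega)
                  · rcases List.mem_cons.1 hibr with hib | hir
                    · rw [hib]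
                    · exact hrb _ hir
              -- max of right part is at least key a ≥ key b
              have hright : vB ≤ pvMx (walls.drop (j + 1)) := by
                refine le_trans (le_trans hkab (le_of_eq hka)) (le_pvMx _ _ ?_)
                rw [mem_drop_iff]
                exact ⟨a.toNat, by omega, haNat, rfl⟩
              rw [pvLevel, hleft, min_eq_left hright]
            · -- all of V lies left of gap j; a ≤ j < b
              have haj : a ≤ (j : Int) := hle a ha
              have hbj : (j : Int) < b := by
                rcases le_total a b with h' | h'
                · simp [ht] at hin; omega
                · simp [ht] at hin; omega
              have hright : pvMx (walls.drop (j + 1)) = vB := by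
                have hkb' := keyval b hbb.1 hbb.2 hbNat
                apply pvMx_eq_of
                · rw [hvB, hkb', mem_drop_iff]
                  exact ⟨b.toNat, by omega, hbNat, rfl⟩
                · intro x hx
                  rw [mem_drop_iff] at hx
                  obtain ⟨i, him, hilen, hix⟩ := hx
                  have hio : (i : Int) ∈ order := (hmem _).2 ⟨by omega, by omega⟩
                  rw [hsplit, List.mem_append] at hio
                  rw [← hix, ← keyvalN i hilen]
                  rcases hio with hiV | hibr
                  · exact absurd (hle _ hiV) (by omega)
                  · rcases List.mem_cons.1 hibr with hib | hir
                    · rw [hib]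
                    · exact hrb _ hir
              have hleft : vB ≤ pvMx (walls.take (j + 1)) := by
                refine le_trans (le_trans hkab (le_of_eq hka)) (le_pvMx _ _ ?_)
                rw [mem_take_iff]
                exact ⟨a.toNat, by omega, haNat, rfl⟩
              rw [pvLevel, hright, min_eq_right hleft]
          exact ⟨fun _ => by rw [hvj, hlevel], fun hnc' => absurd hcross' hnc'⟩
        · have hvj : w'.getD j 0 = -1 := by
            rw [hgd j, if_neg (by tauto), hm1]
          have hncross' : ¬ pvCrossed (V ++ [b]) j := by
            rintro ⟨⟨x1, hx1, hx1'⟩, ⟨x2, hx2, hx2'⟩⟩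
            rcases hall with hgt | hle
            · have hbj : b ≤ (j : Int) := by
                rcases List.mem_append.1 hx1 with h | h
                · exact absurd (hgt _ h) (by omega)
                · simp at h; omega
              have haj : (j : Int) < a := hgt a ha
              exact hin ⟨by simp [hs]; omega, by simp [ht]; omega⟩
            · have hbj : (j : Int) < b := by
                rcases List.mem_append.1 hx2 with h | h
                · exact absurd (hle _ h) (by omega)
                · simp at h; omega
              have haj : a ≤ (j : Int) := hle a ha
              exact hin ⟨by simp [hs]; omega, by simp [ht]; omega⟩
          exact ⟨fun hc' => absurd hc' hncross', fun _ => hvj⟩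
    -- apply the induction hypothesis
    rw [pvChain]
    have hres := IH (V ++ [b]) b w' (by rw [hsplit]; simp) (by simp)
      (by rw [hlen', hlen]) hinv' j hj
    constructor
    · intro hcj
      refine (hres.1 ?_)
      obtain ⟨⟨x1, hx1, hx1'⟩, ⟨x2, hx2, hx2'⟩⟩ := hcj
      constructor
      · refine ⟨x1, ?_, hx1'⟩
        rcases List.mem_append.1 hx1 with h | h
        · exact List.mem_append_left _ (List.mem_append_left _ h)
        · rcases List.mem_cons.1 h with h' | h'
          · exact List.mem_append_left _ (List.mem_append_right _ (by simp [h']))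
          · exact List.mem_append_right _ h'
      · refine ⟨x2, ?_, hx2'⟩
        rcases List.mem_append.1 hx2 with h | h
        · exact List.mem_append_left _ (List.mem_append_left _ h)
        · rcases List.mem_cons.1 h with h' | h'
          · exact List.mem_append_left _ (List.mem_append_right _ (by simp [h']))
          · exact List.mem_append_right _ h'
    · intro hncj
      refine (hres.2 ?_)
      rintro ⟨⟨x1, hx1, hx1'⟩, ⟨x2, hx2, hx2'⟩⟩
      refine hncj ⟨⟨x1, ?_, hx1'⟩, ⟨x2, ?_, hx2'⟩⟩
      · rcases List.mem_append.1 hx1 with h | h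
        · rcases List.mem_append.1 h with h' | h'
          · exact List.mem_append_left _ h'
          · simp at h'; exact List.mem_append_right _ (by simp [h'])
        · exact List.mem_append_right _ (by simp [h])
      · rcases List.mem_append.1 hx2 with h | h
        · rcases List.mem_append.1 h with h' | h'
          · exact List.mem_append_left _ h'
          · simp at h'; exact List.mem_append_right _ (by simp [h'])
        · exact List.mem_append_right _ (by simp [h])

lemma pvW_length (walls : List Int) : (pvW walls).length = walls.length - 1 := by
  rw [pvW]
  cases pvOrder walls with
  | nil => simp
  | cons o0 r => rw [pvChain_length, List.length_replicate]

lemma pvW_spec (walls : List Int)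
    (H : ∀ j : Nat, j < walls.length - 1 → pvLevel walls j ≠ -1) :
    ∀ j : Nat, j < walls.length - 1 → (pvW walls).getD j 0 = pvLevel walls j := by
  intro j hj
  have hmem : ∀ y : Int, y ∈ pvOrder walls ↔ (0 ≤ y ∧ y < (walls.length : Int)) := by
    intro y
    rw [pvOrder, PySem.List.mem_sorted, PySem.List.mem_pyRange_one]
  have hpw : (pvOrder walls).Pairwise
      (fun p q => PySem.List.pyGetD walls q 0 ≤ PySem.List.pyGetD walls p 0) :=
    PySem.List.sorted_pairwise_rev _ _
  rw [pvW]
  cases ho : pvOrder walls with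
  | nil =>
    exfalso
    have h0 : (0 : Int) ∈ pvOrder walls := (hmem 0).2 ⟨le_rfl, by omega⟩
    rw [ho] at h0
    cases h0
  | cons o0 r =>
    rw [ho] at hmem hpw
    have hbase : ∀ j' : Nat, j' < walls.length - 1 →
        (pvCrossed [o0] j' → (List.replicate (walls.length - 1) (-1 : Int)).getD j' 0 = pvLevel walls j') ∧
        (¬ pvCrossed [o0] j' → (List.replicate (walls.length - 1) (-1 : Int)).getD j' 0 = -1) := by
      intro j' hj'
      constructor
      · rintro ⟨⟨x1, hx1, hx1'⟩, ⟨x2, hx2, hx2'⟩⟩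
        simp at hx1 hx2
        omega
      · intro _
        rw [List.getD_eq_getElem _ _ (by rw [List.length_replicate]; omega)]
        exact List.getElem_replicate _
    have hres := pvChain_inv walls H (o0 :: r) hmem hpw r [o0] o0
      (List.replicate (walls.length - 1) (-1 : Int)) rfl (by simp)
      (List.length_replicate) hbase j hj
    apply hres.1
    refine ⟨⟨0, ?_, by omega⟩, ⟨((walls.length - 1 : Nat) : Int), ?_, by omega⟩⟩
    · have : (0 : Int) ∈ o0 :: r := (hmem 0).2 ⟨le_rfl, by omega⟩
      simpa using this
    · have : ((walls.length - 1 : Nat) : Int) ∈ o0 :: r := (hmem _).2 ⟨by omega, by omega⟩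
      simpa using this

lemma unchanged_main (walls : List Int)
    (H : ∀ j : Nat, j < walls.length - 1 → pvLevel walls j ≠ -1) :
    waterContainer walls = waterContainer_alt walls := by
  rw [A_eq_map, alt_eq]
  apply List.ext_getElem
  · rw [List.length_map, pvW_length, List.length_map, List.length_range]
  · intro j h1 h2
    have hj : j < walls.length - 1 := by
      rw [List.length_map, pvW_length] at h1; exact h1
    have hjW : j < (pvW walls).length := by rw [pvW_length]; omega
    rw [List.getElem_map, List.getElem_map, List.getElem_range]
    have hv : (pvW walls)[j] = pvLevel walls j := by
      rw [← List.getD_eq_getElem _ 0 (by rw [pvW_length]; omega)]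
      exact pvW_spec walls H j hj
    rw [hv, if_neg (H j hj)]

lemma tight_main (walls : List Int) (j : Nat) (hj : j < walls.length - 1)
    (hlev : pvLevel walls j = -1) :
    waterContainer walls ≠ waterContainer_alt walls := by
  intro heq
  rw [A_eq_map, alt_eq] at heq
  have hjA : j < ((pvW walls).map (fun x => if x = -1 then 0 else x)).length := by
    rw [List.length_map, pvW_length]; omega
  have hjB : j < ((List.range (walls.length - 1)).map (fun j => pvLevel walls j)).length := by
    rw [List.length_map, List.length_range]; omega
  have := List.getElem_of_eq heq hjA
  rw [List.getElem_map, List.getElem_map, List.getElem_range] at this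
  rw [hlev] at this
  by_cases h : (pvW walls)[j] = -1
  · rw [if_pos h] at this; omega
  · rw [if_neg h] at this; exact h this

-- ===== VERDICT (by name: the statements are the Claim_ definitions above) =====
theorem waterContainer_spec : Claim_unchanged_waterContainer := by
  intro walls _ hnd
  have H : ∀ j : Nat, j < walls.length - 1 → pvLevel walls j ≠ -1 := by
    intro j hj hc
    exact hnd ((pvGap_iff_D walls).1 ((levelNeg_iff walls).1 ⟨j, hj, hc⟩))
  exact unchanged_main walls H

theorem waterContainer_changed : Claim_changed_waterContainer := by
  unfold Claim_changed_waterContainer; decide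

theorem waterContainer_tight : Claim_exact_waterContainer := by
  intro walls _ hd
  obtain ⟨j, hj, hlev⟩ := (levelNeg_iff walls).2 ((pvGap_iff_D walls).2 hd)
  exact tight_main walls j hj hlev
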